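-- pv_equiv track=rewrite | github.com/Worldwidebro/business-template-marketplace | monetization/stripe-integration.py | _get_category_for_template
-- ===== SOURCE A (Python) =====
-- def _get_category_for_template(template_id: int) -> str:
--     """Map template ID to category"""
--     category_mapping = {
--         (1, 60): 'Corporate & Enterprise',
--         (61, 132): 'Financial Services',
--         (133, 192): 'E-commerce & Retail',
--         (193, 252): 'Education & Training',
--         (253, 272): 'Healthcare & Wellness',
--         (273, 312): 'Community Impact',
--         (313, 372): 'Creative & Media',
--         (373, 432): 'Construction & Real Estate',
--         (433, 467): 'Technology & SaaS',
--         (468, 487): 'Research & Development'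
--     }
--
--     for (start, end), category in category_mapping.items():
--         if start <= template_id <= end:
--             return category
--
--     return 'Miscellaneous'
-- ===== SOURCE B (Python) =====
-- import bisect
--
-- _BOUNDS = [60, 132, 192, 252, 272, 312, 372, 432, 467, 487]
-- _CATEGORIES = ['Corporate & Enterprise', 'Financial Services', 'E-commerce & Retail',
--                'Education & Training', 'Healthcare & Wellness', 'Community Impact',
--                'Creative & Media', 'Construction & Real Estate', 'Technology & SaaS',
--                'Research & Development']
--
-- def _get_category_for_template(template_id: int) -> str:
--     """Map template ID to category"""
--     if template_id < 1 or template_id > 487: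
--         return 'Miscellaneous'
--     return _CATEGORIES[bisect.bisect_left(_BOUNDS, template_id)]
-- ===== Notes on version B (the rewrite author's own statement) =====
-- stated objective: idiomatic
-- what changed: Replaced the linear scan over interval tuples with a range check plus binary search (bisect_left) over a sorted table of upper bounds with a parallel category list.
import Mathlib
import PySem

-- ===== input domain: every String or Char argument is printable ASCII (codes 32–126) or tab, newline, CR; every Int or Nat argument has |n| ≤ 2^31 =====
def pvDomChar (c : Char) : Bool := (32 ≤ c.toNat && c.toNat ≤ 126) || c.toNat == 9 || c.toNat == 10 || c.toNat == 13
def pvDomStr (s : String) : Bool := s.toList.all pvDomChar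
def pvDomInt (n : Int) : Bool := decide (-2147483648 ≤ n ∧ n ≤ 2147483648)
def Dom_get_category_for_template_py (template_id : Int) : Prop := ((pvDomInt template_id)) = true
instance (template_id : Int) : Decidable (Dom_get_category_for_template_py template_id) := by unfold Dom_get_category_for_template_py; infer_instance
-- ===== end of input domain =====

-- B replaces A's linear scan over interval tuples with a bounds check plus a
-- binary search (bisect_left) over a sorted table of upper bounds (idiomatic).


-- ===== PORT A =====
-- the dict literal, as an insertion-ordered association list
def pvCategoryMapping : List ((Int × Int) × String) :=
  [((1, 60), "Corporate & Enterprise"),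
   ((61, 132), "Financial Services"),
   ((133, 192), "E-commerce & Retail"),
   ((193, 252), "Education & Training"),
   ((253, 272), "Healthcare & Wellness"),
   ((273, 312), "Community Impact"),
   ((313, 372), "Creative & Media"),
   ((373, 432), "Construction & Real Estate"),
   ((433, 467), "Technology & SaaS"),
   ((468, 487), "Research & Development")]

-- the for-loop with early return
def pvLoopA (template_id : Int) : List ((Int × Int) × String) → String
  | [] => "Miscellaneous"
  | ((s, e), category) :: rest =>
      if s ≤ template_id ∧ template_id ≤ e then category
      else pvLoopA template_id rest

def get_category_for_template_py (template_id : Int) : String :=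
  pvLoopA template_id pvCategoryMapping

-- ===== PORT B =====
def pvBounds : List Int := [60, 132, 192, 252, 272, 312, 372, 432, 467, 487]
def pvCategories : List String :=
  ["Corporate & Enterprise", "Financial Services", "E-commerce & Retail",
   "Education & Training", "Healthcare & Wellness", "Community Impact",
   "Creative & Media", "Construction & Real Estate", "Technology & SaaS",
   "Research & Development"]

-- bisect.bisect_left(a, x): lo = 0, hi = len(a); while lo < hi: mid = (lo+hi)//2; …
-- (fuel = hi - lo bounds the loop; each iteration strictly shrinks the interval)
def pvBisectLeft (a : List Int) (x : Int) : Nat → Nat → Nat → Nat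
  | 0, lo, _ => lo
  | fuel + 1, lo, hi =>
      if lo < hi then
        let mid := (lo + hi) / 2
        if a.getD mid 0 < x then pvBisectLeft a x fuel (mid + 1) hi
        else pvBisectLeft a x fuel lo mid
      else lo

def get_category_for_template_py_alt (template_id : Int) : String :=
  if template_id < 1 ∨ template_id > 487 then "Miscellaneous"
  else pvCategories.getD (pvBisectLeft pvBounds template_id pvBounds.length 0 pvBounds.length) ""

-- ===== PRECONDITION & SPEC =====
def Spec_get_category_for_template_py (template_id : Int) (out : String) : Prop := out = get_category_for_template_py_alt template_id
instance (template_id : Int) (out : String) : Decidable (Spec_get_category_for_template_py template_id out) := by unfold Spec_get_category_for_template_py; infer_instance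

-- ===== CLAIM (what is proved, stated in full; the proofs are below) =====
def Claim_equal_get_category_for_template_py : Prop := ∀ (template_id : Int), Dom_get_category_for_template_py template_id → Spec_get_category_for_template_py template_id (get_category_for_template_py template_id)

-- ===== LEMMAS AND PROOFS =====

-- ===== VERDICT (by name: the statement is the Claim_ definition above) =====
theorem get_category_for_template_py_spec : Claim_equal_get_category_for_template_py := by
  unfold Claim_equal_get_category_for_template_py Spec_get_category_for_template_py
  intro t _
  by_cases h : 1 ≤ t ∧ t ≤ 487
  · obtain ⟨h1, h2⟩ := h
    interval_cases t <;> decide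
  · have hout : t < 1 ∨ t > 487 := by omega
    unfold get_category_for_template_py get_category_for_template_py_alt pvCategoryMapping
    simp only [pvLoopA]
    rw [if_pos hout]
    split_ifs <;> first | rfl | omega
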